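-- pv_equiv track=rewrite | github.com/yuxwang99/ACE-adapt | function_call_analysis.py | decompose_nested_function_call
-- ===== SOURCE A (Python) =====
-- def decompose_nested_function_call(line: str):
--     """
--     Decompose the nested expression in a line, and return the decomposed
--     expression split by () without ";"
--     e.g.
--     Args
--         line:
--               "Slope=abs(my_slope(tHRV(i-x0+1:i),RR_Interv(i-x0+1:i)));"
--
--     Returns
--         map_table:
--               {'#0': 'tHRV(i-x0+1:i)',
--                '#1': 'RR_Interv(i-x0+1:i)',
--                '#2': 'my_slope(#0,#1)',
--                '#3': 'abs(#2)'}
--         final_call: 'Slope=#3'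
--     """
--     expr_stack = []
--     map_table = {}
--
--     pre_word = ""
--     pos_bracket = []
--     for char in line:
--         if (pre_word + char).isidentifier():
--             pre_word = pre_word + char
--         elif char != " ":
--             if pre_word != ")":
--                 expr_stack.append(pre_word)
--             if char == "(":
--                 pos_bracket.append(len(expr_stack))
--
--             if char == ")":
--                 expr = ""
--                 for var in expr_stack[pos_bracket[-1] - 1 :]:
--                     expr = expr + var
--                 expr_stack = expr_stack[: pos_bracket[-1] - 1]
--                 expr_stack.append("#" + str(len(map_table)))
--                 map_table["#" + str(len(map_table))] = expr + ")"
--                 pos_bracket = pos_bracket[:-1]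
--
--             pre_word = char
--     if pre_word != ")" and pre_word != ";":
--         expr_stack.append(pre_word)
--
--     final_call = ""
--     for exp in expr_stack:
--         final_call = final_call + exp
--     return map_table, final_call
-- ===== SOURCE B (Python) =====
-- def decompose_nested_function_call(line: str):
--     """Single pass with a stack of per-bracket string builders (no token list, no
--     position markers, no slicing) and an incremental word test (no re-scan of the
--     growing token): O(n) against A's repeated slicing/joining and token re-scans."""
--     map_table = {}
--     segs = []        # completed text of the enclosing bracket levels
--     cur = ""         # committed text of the current level
--     pending = ""     # token in progress: identifier word, symbol, or a '#k' placeholder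
--     wordish = True   # pending is "" or an identifier word
--     for ch in line:
--         if wordish and (ch.isalnum() or ch == "_") and (pending != "" or ch.isalpha() or ch == "_"):
--             pending += ch
--         elif ch == "(":
--             segs.append(cur)
--             cur = pending          # the callee token opens the new level
--             pending = "("
--             wordish = False
--         elif ch == ")":
--             key = "#" + str(len(map_table))
--             map_table[key] = cur + pending + ")"
--             cur = segs.pop()
--             pending = key
--             wordish = False
--         elif ch != " ":
--             cur += pending
--             pending = ch
--             wordish = ch.isalpha() or ch == "_"
--     if pending != ";":
--         cur += pending
--     return map_table, "".join(segs) + cur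
-- ===== Notes on version B (the rewrite author's own statement) =====
-- stated objective: faster
-- what changed: Replaces A's flat token list with bracket markers, per-')' list slicing/joining and per-char isidentifier() re-scan of the growing token by a stack of per-bracket string builders with one pending token and an O(1) incremental word-class test.
import Mathlib
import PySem

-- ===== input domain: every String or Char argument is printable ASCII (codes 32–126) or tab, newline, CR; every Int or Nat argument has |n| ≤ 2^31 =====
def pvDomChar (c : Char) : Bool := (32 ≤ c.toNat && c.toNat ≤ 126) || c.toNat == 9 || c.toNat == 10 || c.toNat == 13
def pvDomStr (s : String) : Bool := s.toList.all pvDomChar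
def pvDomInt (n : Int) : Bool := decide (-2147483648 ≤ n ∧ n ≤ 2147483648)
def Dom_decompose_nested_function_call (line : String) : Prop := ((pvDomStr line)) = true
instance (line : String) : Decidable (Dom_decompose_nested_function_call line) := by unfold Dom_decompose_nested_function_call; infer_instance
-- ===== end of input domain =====

-- B replaces A's token list + bracket markers + per-')' slicing/joining + per-char
-- isidentifier() re-scan by a stack of per-bracket string builders with one pending
-- token and an incremental word-class test (faster; see claim).

-- ===== PORT A =====
-- Python str.isidentifier(), exact on the ASCII domain (Dom admits only ASCII).
def pvIsIdent (s : List Char) : Bool :=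
  match s with
  | [] => false
  | c :: cs => (c.isAlpha || c == '_') && cs.all (fun d => d.isAlphanum || d == '_')

-- A's loop state: expr_stack, map_table, pre_word, pos_bracket (strings as List Char).
structure StA where
  st : List (List Char)
  mp : PySem.Dict (List Char) (List Char)
  pw : List Char
  pb : List Nat
deriving Repr

def stepA (s : StA) (c : Char) : StA :=
  if pvIsIdent (s.pw ++ [c]) then { s with pw := s.pw ++ [c] }
  else if c ≠ ' ' then
    let st1 := if s.pw ≠ [')'] then s.st ++ [s.pw] else s.st
    let pb1 := if c = '(' then s.pb ++ [st1.length] else s.pb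
    if c = ')' then
      -- pos_bracket[-1]; Python raises IndexError when pos_bracket is empty (outside Pre_)
      let p := (pb1.getLast?).getD 0
      let expr := List.foldl (· ++ ·) [] (st1.drop (p - 1))
      let key := '#' :: PySem.Int.toChars (s.mp.size : Int)
      { st := st1.take (p - 1) ++ [key], mp := s.mp.insert key (expr ++ [')']),
        pw := [')'], pb := pb1.dropLast }
    else { st := st1, mp := s.mp, pw := [c], pb := pb1 }
  else s

def decompose_nested_function_call (line : String) : (List (String × String)) × String :=
  let s := line.toList.foldl stepA ⟨[], PySem.Dict.empty, [], []⟩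
  let stF := if s.pw ≠ [')'] ∧ s.pw ≠ [';'] then s.st ++ [s.pw] else s.st
  let final := List.foldl (· ++ ·) [] stF
  (s.mp.items.map (fun kv => (String.ofList kv.1, String.ofList kv.2)), String.ofList final)

-- ===== PORT B =====
-- B's loop state: segs (enclosing levels), cur (current level), pending token
-- with its incremental word flag, and the map.
structure StB where
  segs : List (List Char)
  cur : List Char
  pend : List Char
  wordish : Bool      -- pend is "" or an identifier word
  mp : PySem.Dict (List Char) (List Char)
deriving Repr

def stepB (s : StB) (c : Char) : StB :=
  if s.wordish && (c.isAlphanum || c == '_') && (!s.pend.isEmpty || c.isAlpha || c == '_') then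
    { s with pend := s.pend ++ [c] }
  else if c = '(' then
    ⟨s.segs ++ [s.cur], s.pend, ['('], false, s.mp⟩
  else if c = ')' then
    let key := '#' :: PySem.Int.toChars (s.mp.size : Int)
    -- segs.pop(); Python raises IndexError when segs is empty (outside Pre_)
    ⟨s.segs.dropLast, (s.segs.getLast?).getD [], key, false,
      s.mp.insert key (s.cur ++ s.pend ++ [')'])⟩
  else if c ≠ ' ' then
    ⟨s.segs, s.cur ++ s.pend, [c], c.isAlpha || c == '_', s.mp⟩
  else s

def decompose_nested_function_call_alt (line : String) : (List (String × String)) × String :=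
  let s := line.toList.foldl stepB ⟨[], [], [], true, PySem.Dict.empty⟩
  let cur1 := if s.pend ≠ [';'] then s.cur ++ s.pend else s.cur
  (s.mp.items.map (fun kv => (String.ofList kv.1, String.ofList kv.2)),
   String.ofList (List.foldl (· ++ ·) [] s.segs ++ cur1))

-- ===== PRECONDITION & SPEC =====
-- A raises IndexError on the ')' that closes no '(' (pos_bracket empty); B's pop raises
-- there too.  Pre_ admits exactly the lines in which no prefix has more ')' than '('.
def Pre_decompose_nested_function_call (line : String) : Prop :=
  ∀ i ≤ line.toList.length, (line.toList.take i).count ')' ≤ (line.toList.take i).count '('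
instance (line : String) : Decidable (Pre_decompose_nested_function_call line) := by
  unfold Pre_decompose_nested_function_call; infer_instance

def pvWitness_decompose_nested_function_call : String := "Slope=abs(my_slope(a,b));"

def Spec_decompose_nested_function_call (line : String) (out : (List (String × String)) × String) : Prop := out = decompose_nested_function_call_alt line
instance (line : String) (out : (List (String × String)) × String) : Decidable (Spec_decompose_nested_function_call line out) := by unfold Spec_decompose_nested_function_call; infer_instance

-- ===== CLAIM (what is proved, stated in full; the proofs are below) =====
def Claim_equal_decompose_nested_function_call : Prop := ∀ (line : String), Dom_decompose_nested_function_call line → Pre_decompose_nested_function_call line → Spec_decompose_nested_function_call line (decompose_nested_function_call line)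

-- ===== LEMMAS AND PROOFS =====

-- A's (expr_stack, pos_bracket) cut into per-bracket segments equals B's seg stack + top.
-- Arguments carry pos_bracket and segs REVERSED (most recent first).
def RSeg : List Nat → List (List Char) → List (List Char) → List Char → Prop
  | [], [], st, top => st.flatten = top
  | p :: pbR, sg :: segsR, st, top =>
      1 ≤ p ∧ p ≤ st.length ∧ (st.drop (p - 1)).flatten = top ∧
        RSeg pbR segsR (st.take (p - 1)) sg
  | _, _, _, _ => False

-- the coupling invariant between A's and B's loop states
def CoupInv (a : StA) (b : StB) : Prop :=
  b.mp = a.mp ∧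
  (if a.pw = [')'] then (a.st.getLast? = some b.pend ∧ ∃ t, b.pend = '#' :: t)
   else b.pend = a.pw) ∧
  RSeg a.pb.reverse b.segs.reverse
      (if a.pw = [')'] then a.st else a.st ++ [a.pw]) (b.cur ++ b.pend) ∧
  List.IsChain (· > ·) a.pb.reverse ∧
  (∀ p ∈ a.pb.reverse.head?,
      p < (if a.pw = [')'] then a.st else a.st ++ [a.pw]).length) ∧
  b.wordish = (pvIsIdent b.pend || b.pend.isEmpty)

-- prefix-balance, consumed char by char by the simulation
def BalN : List Char → Nat → Prop
  | [], _ => True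
  | c :: cs, k =>
      if c = ')' then 1 ≤ k ∧ BalN cs (k - 1)
      else if c = '(' then BalN cs (k + 1) else BalN cs k

lemma foldl_append_eq_flatten (l : List (List Char)) :
    ∀ a : List Char, List.foldl (· ++ ·) a l = a ++ l.flatten := by
  induction l with
  | nil => intro a; simp
  | cons x xs ih => intro a; simp [List.foldl, ih]

lemma pvIsIdent_ne_rparen {s : List Char} (h : pvIsIdent s = true) : s ≠ [')'] := by
  intro he; rw [he] at h; simp [pvIsIdent] at h

lemma pvIsIdent_last {s : List Char} {c : Char}
    (h : pvIsIdent (s ++ [c]) = true) : (c.isAlphanum || c == '_') = true := by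
  cases s with
  | nil =>
    simp [pvIsIdent] at h
    rcases h with h | h
    · simp [Char.isAlphanum, h]
    · simp [h]
  | cons x xs =>
    simp [pvIsIdent] at h
    rcases h.2.2 with h' | h'
    · simp [h']
    · simp [h']

lemma pvIsIdent_hash {t : List Char} {c : Char} :
    pvIsIdent (('#' :: t) ++ [c]) = false := by
  simp [pvIsIdent]

lemma pvIsIdent_hash_head {t : List Char} : pvIsIdent ('#' :: t) = false := by
  simp [pvIsIdent]

lemma pvIsIdent_space {s : List Char} : pvIsIdent (s ++ [' ']) = false := by
  cases hi : pvIsIdent (s ++ [' '])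
  · rfl
  · exact absurd (pvIsIdent_last hi) (by decide)

lemma pvIsIdent_lparen : pvIsIdent ['('] = false := by decide

lemma pvIsIdent_prefix {s : List Char} {c : Char}
    (h : pvIsIdent (s ++ [c]) = true) : (pvIsIdent s || s.isEmpty) = true := by
  cases s with
  | nil => simp
  | cons x xs =>
    simp [pvIsIdent, List.all_append] at h ⊢
    exact ⟨h.1, h.2.1⟩

-- B's incremental word test computes exactly A's isidentifier test
lemma stepB_cond (b : StB) (c : Char)
    (hw : b.wordish = (pvIsIdent b.pend || b.pend.isEmpty)) :
    (b.wordish && (c.isAlphanum || c == '_') && (!b.pend.isEmpty || c.isAlpha || c == '_'))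
      = pvIsIdent (b.pend ++ [c]) := by
  rw [hw]
  cases hp : b.pend with
  | nil =>
    simp only [List.nil_append, pvIsIdent, List.isEmpty_nil, Bool.or_true, Bool.true_and,
      List.all_nil, Bool.and_true, Bool.not_true, Bool.false_or]
    cases hA : c.isAlpha <;> cases hD : c.isDigit <;> cases hU : (c == '_') <;>
      simp [Char.isAlphanum, hA, hD, hU]
  | cons x xs =>
    simp only [pvIsIdent, List.cons_append, List.all_append, List.all_cons, List.all_nil,
      List.isEmpty_cons, Bool.or_false, Bool.not_false, Bool.true_or, Bool.and_true]
    cases hx : (x.isAlpha || x == '_') <;> simp [Bool.and_assoc]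

lemma flatten_dropLast {l : List (List Char)} {top x : List Char}
    (hl : l.getLast? = some x) (hf : l.flatten = top ++ x) :
    l.dropLast.flatten = top := by
  obtain ⟨l', rfl⟩ := List.getLast?_eq_some_iff.mp hl
  simp at hf ⊢
  simp [hf]

lemma RSeg_append {pbR : List Nat} {segsR st : List (List Char)} {top x : List Char}
    (h : RSeg pbR segsR st top) : RSeg pbR segsR (st ++ [x]) (top ++ x) := by
  cases pbR with
  | nil =>
    cases segsR with
    | nil => simp only [RSeg] at h ⊢; simp [h]
    | cons sg segsR' => exact absurd h (by simp [RSeg])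
  | cons p pbR' =>
    cases segsR with
    | nil => exact absurd h (by simp [RSeg])
    | cons sg segsR' =>
      obtain ⟨h1, h2, h3, h4⟩ := h
      refine ⟨h1, by simp; omega, ?_, ?_⟩
      · rw [List.drop_append_of_le_length (by omega)]
        simp [h3]
      · rw [List.take_append_of_le_length (by omega)]
        exact h4

lemma RSeg_dropLast {pbR : List Nat} {segsR st : List (List Char)} {top x : List Char}
    (h : RSeg pbR segsR st (top ++ x)) (hl : st.getLast? = some x)
    (hp : ∀ p ∈ pbR.head?, p < st.length) : RSeg pbR segsR st.dropLast top := by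
  cases pbR with
  | nil =>
    cases segsR with
    | nil => exact flatten_dropLast hl h
    | cons sg segsR' => exact absurd h (by simp [RSeg])
  | cons p pbR' =>
    cases segsR with
    | nil => exact absurd h (by simp [RSeg])
    | cons sg segsR' =>
      obtain ⟨h1, h2, h3, h4⟩ := h
      have hplt : p < st.length := hp p (by simp)
      refine ⟨h1, by simp [List.length_dropLast]; omega, ?_, ?_⟩
      · have hd : st.dropLast.drop (p - 1) = (st.drop (p - 1)).dropLast := by
          rw [List.dropLast_eq_take, List.drop_take, List.dropLast_eq_take,
            List.length_drop]
          congr 1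
          omega
        rw [hd]
        have hne : st.drop (p - 1) ≠ [] := by
          intro he
          have := congrArg List.length he
          simp at this
          omega
        have hlast : (st.drop (p - 1)).getLast? = some x := by
          rw [← hl]
          conv_rhs => rw [← List.take_append_drop (p - 1) st]
          rw [List.getLast?_append_of_ne_nil _ hne]
        exact flatten_dropLast hlast h3
      · have ht : st.dropLast.take (p - 1) = st.take (p - 1) := by
          rw [List.dropLast_eq_take, List.take_take]
          congr 1
          omega
        rw [ht]
        exact h4

lemma RSeg_flatten {pbR : List Nat} : ∀ {segsR st : List (List Char)} {top : List Char},
    RSeg pbR segsR st top → st.flatten = segsR.reverse.flatten ++ top := by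
  induction pbR with
  | nil =>
    intro segsR st top h
    cases segsR with
    | nil => simpa using h
    | cons sg segsR' => exact absurd h (by simp [RSeg])
  | cons p pbR' ih =>
    intro segsR st top h
    cases segsR with
    | nil => exact absurd h (by simp [RSeg])
    | cons sg segsR' =>
      obtain ⟨h1, h2, h3, h4⟩ := h
      have := ih h4
      calc st.flatten = (st.take (p-1)).flatten ++ (st.drop (p-1)).flatten := by
            rw [← List.flatten_append, List.take_append_drop]
        _ = (segsR'.reverse.flatten ++ sg) ++ top := by rw [this, h3]
        _ = (sg :: segsR').reverse.flatten ++ top := by simp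

-- branch equations for the two step functions
lemma stepA_ident {a : StA} {c : Char} (h : pvIsIdent (a.pw ++ [c]) = true) :
    stepA a c = { a with pw := a.pw ++ [c] } := by
  simp [stepA, h]

lemma stepB_ident {b : StB} {c : Char} (h : pvIsIdent (b.pend ++ [c]) = true)
    (hw : b.wordish = (pvIsIdent b.pend || b.pend.isEmpty)) :
    stepB b c = { b with pend := b.pend ++ [c] } := by
  simp [stepB, stepB_cond b c hw, h]

lemma stepA_open_flush {a : StA} (h : pvIsIdent (a.pw ++ ['(']) = false)
    (hpw : a.pw ≠ [')']) :
    stepA a '(' = ⟨a.st ++ [a.pw], a.mp, ['('], a.pb ++ [a.st.length + 1]⟩ := by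
  simp [stepA, h, hpw]

lemma stepA_open_nf {a : StA} (hpw : a.pw = [')']) :
    stepA a '(' = ⟨a.st, a.mp, ['('], a.pb ++ [a.st.length]⟩ := by
  simp [stepA, hpw, pvIsIdent]

lemma stepB_open {b : StB} (h : pvIsIdent (b.pend ++ ['(']) = false)
    (hw : b.wordish = (pvIsIdent b.pend || b.pend.isEmpty)) :
    stepB b '(' = ⟨b.segs ++ [b.cur], b.pend, ['('], false, b.mp⟩ := by
  simp [stepB, stepB_cond b '(' hw, h]

lemma stepA_close_flush {a : StA} (h : pvIsIdent (a.pw ++ [')']) = false)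
    (hpw : a.pw ≠ [')']) :
    stepA a ')' =
      ⟨(a.st ++ [a.pw]).take ((a.pb.getLast?.getD 0) - 1) ++
          ['#' :: PySem.Int.toChars (a.mp.size : Int)],
        a.mp.insert ('#' :: PySem.Int.toChars (a.mp.size : Int))
          (List.foldl (· ++ ·) [] ((a.st ++ [a.pw]).drop ((a.pb.getLast?.getD 0) - 1)) ++ [')']),
        [')'], a.pb.dropLast⟩ := by
  simp [stepA, h, hpw]

lemma stepA_close_nf {a : StA} (hpw : a.pw = [')']) :
    stepA a ')' =
      ⟨a.st.take ((a.pb.getLast?.getD 0) - 1) ++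
          ['#' :: PySem.Int.toChars (a.mp.size : Int)],
        a.mp.insert ('#' :: PySem.Int.toChars (a.mp.size : Int))
          (List.foldl (· ++ ·) [] (a.st.drop ((a.pb.getLast?.getD 0) - 1)) ++ [')']),
        [')'], a.pb.dropLast⟩ := by
  simp [stepA, hpw, pvIsIdent]

lemma stepB_close {b : StB} (h : pvIsIdent (b.pend ++ [')']) = false)
    (hw : b.wordish = (pvIsIdent b.pend || b.pend.isEmpty)) :
    stepB b ')' =
      ⟨b.segs.dropLast, (b.segs.getLast?).getD [],
        '#' :: PySem.Int.toChars (b.mp.size : Int), false,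
        b.mp.insert ('#' :: PySem.Int.toChars (b.mp.size : Int)) (b.cur ++ b.pend ++ [')'])⟩ := by
  simp [stepB, stepB_cond b ')' hw, h]

lemma stepA_sym_flush {a : StA} {c : Char} (h : pvIsIdent (a.pw ++ [c]) = false)
    (hpw : a.pw ≠ [')']) (hc1 : c ≠ '(') (hc2 : c ≠ ')') (hc3 : c ≠ ' ') :
    stepA a c = ⟨a.st ++ [a.pw], a.mp, [c], a.pb⟩ := by
  simp [stepA, h, hpw, hc1, hc2, hc3]

lemma stepA_sym_nf {a : StA} {c : Char} (hpw : a.pw = [')'])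
    (hc1 : c ≠ '(') (hc2 : c ≠ ')') (hc3 : c ≠ ' ') :
    stepA a c = ⟨a.st, a.mp, [c], a.pb⟩ := by
  simp [stepA, hpw, hc1, hc2, hc3, pvIsIdent]

lemma stepB_sym {b : StB} {c : Char} (h : pvIsIdent (b.pend ++ [c]) = false)
    (hw : b.wordish = (pvIsIdent b.pend || b.pend.isEmpty))
    (hc1 : c ≠ '(') (hc2 : c ≠ ')') (hc3 : c ≠ ' ') :
    stepB b c = ⟨b.segs, b.cur ++ b.pend, [c], c.isAlpha || c == '_', b.mp⟩ := by
  simp [stepB, stepB_cond b c hw, h, hc1, hc2, hc3]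

lemma stepA_space {a : StA} (h : pvIsIdent (a.pw ++ [' ']) = false) :
    stepA a ' ' = a := by
  simp [stepA, h]

lemma stepB_space {b : StB} (hw : b.wordish = (pvIsIdent b.pend || b.pend.isEmpty)) :
    stepB b ' ' = b := by
  simp [stepB, stepB_cond b ' ' hw, pvIsIdent_space]

-- shared cores of the simulation step, stated over explicit successor states

lemma open_core (T : List (List Char)) (mpA : PySem.Dict (List Char) (List Char))
    (b : StB) (pbA : List Nat)
    (hmp : b.mp = mpA) (hlast : T.getLast? = some b.pend)
    (hseg : RSeg pbA.reverse b.segs.reverse T (b.cur ++ b.pend))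
    (hch : List.IsChain (· > ·) pbA.reverse)
    (hhd : ∀ p ∈ pbA.reverse.head?, p < T.length) :
    CoupInv ⟨T, mpA, ['('], pbA ++ [T.length]⟩
      ⟨b.segs ++ [b.cur], b.pend, ['('], false, b.mp⟩ := by
  have hTne : T ≠ [] := by intro h; rw [h] at hlast; simp at hlast
  have hTpos : 0 < T.length := List.length_pos_iff.mpr hTne
  refine ⟨hmp, by simp, ?_, ?_, ?_, by simp [pvIsIdent_lparen]⟩
  · show RSeg (pbA ++ [T.length]).reverse (b.segs ++ [b.cur]).reverse
      (T ++ [['(']]) (b.pend ++ ['('])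
    simp only [List.reverse_append, List.reverse_cons, List.reverse_nil,
      List.nil_append, List.cons_append]
    refine ⟨hTpos, by simp, ?_, ?_⟩
    · rw [List.drop_append_of_le_length (by omega)]
      obtain ⟨l', hl'⟩ := List.getLast?_eq_some_iff.mp hlast
      subst hl'
      have hd : (l' ++ [b.pend]).drop ((l' ++ [b.pend]).length - 1) = [b.pend] := by simp
      rw [hd]
      simp
    · rw [List.take_append_of_le_length (by omega), ← List.dropLast_eq_take]
      exact RSeg_dropLast hseg hlast hhd
  · show List.IsChain (· > ·) (pbA ++ [T.length]).reverse
    rw [List.reverse_append]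
    simp only [List.reverse_cons, List.reverse_nil, List.nil_append, List.singleton_append]
    rw [List.isChain_cons]
    exact ⟨fun q hq => hhd q hq, hch⟩
  · intro p hp
    simp only [List.reverse_append, List.reverse_cons, List.reverse_nil,
      List.nil_append, List.cons_append, List.head?_cons, Option.mem_def,
      Option.some.injEq] at hp
    subst hp
    simp

lemma sym_core (T : List (List Char)) (mpA : PySem.Dict (List Char) (List Char))
    (b : StB) (pbA : List Nat) (c : Char)
    (hmp : b.mp = mpA)
    (hseg : RSeg pbA.reverse b.segs.reverse T (b.cur ++ b.pend))
    (hch : List.IsChain (· > ·) pbA.reverse)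
    (hhd : ∀ p ∈ pbA.reverse.head?, p < T.length)
    (hc2 : c ≠ ')') :
    CoupInv ⟨T, mpA, [c], pbA⟩
      ⟨b.segs, b.cur ++ b.pend, [c], c.isAlpha || c == '_', b.mp⟩ := by
  have hcr : ¬(([c] : List Char) = [')']) := by simpa using hc2
  refine ⟨hmp, ?_, ?_, hch, ?_, by simp [pvIsIdent]⟩
  · show (if ([c] : List Char) = [')'] then _ else _)
    rw [if_neg hcr]
  · show RSeg pbA.reverse b.segs.reverse
      (if ([c] : List Char) = [')'] then T else T ++ [[c]]) ((b.cur ++ b.pend) ++ [c])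
    rw [if_neg hcr]
    exact RSeg_append hseg
  · intro q hq
    show q < (if ([c] : List Char) = [')'] then T else T ++ [[c]]).length
    rw [if_neg hcr]
    have := hhd q hq
    simp only [List.length_append, List.length_cons, List.length_nil]
    omega

lemma ident_core (st : List (List Char)) (mpA : PySem.Dict (List Char) (List Char))
    (b : StB) (pbA : List Nat) (w : List Char) (c : Char)
    (hmp : b.mp = mpA) (hpend : b.pend = w)
    (hseg : RSeg pbA.reverse b.segs.reverse (st ++ [w]) (b.cur ++ b.pend))
    (hch : List.IsChain (· > ·) pbA.reverse)
    (hhd : ∀ p ∈ pbA.reverse.head?, p < (st ++ [w]).length)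
    (hnew : ¬(w ++ [c] = [')'])) (hid : pvIsIdent (w ++ [c]) = true)
    (hwt : b.wordish = true) :
    CoupInv ⟨st, mpA, w ++ [c], pbA⟩ ⟨b.segs, b.cur, b.pend ++ [c], b.wordish, b.mp⟩ := by
  subst hpend
  have hseg' : RSeg pbA.reverse b.segs.reverse st b.cur := by
    have := RSeg_dropLast (x := b.pend) hseg (by simp) hhd
    rwa [List.dropLast_concat] at this
  refine ⟨hmp, ?_, ?_, hch, ?_, by simp [hwt, hid]⟩
  · show (if b.pend ++ [c] = [')'] then _ else _)
    rw [if_neg hnew]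
  · show RSeg pbA.reverse b.segs.reverse
      (if b.pend ++ [c] = [')'] then st else st ++ [b.pend ++ [c]])
      (b.cur ++ (b.pend ++ [c]))
    rw [if_neg hnew]
    exact RSeg_append hseg'
  · intro q hq
    show q < (if b.pend ++ [c] = [')'] then st else st ++ [b.pend ++ [c]]).length
    rw [if_neg hnew]
    have := hhd q hq
    simp only [List.length_append, List.length_cons, List.length_nil] at this ⊢
    omega

lemma close_core (st1 : List (List Char)) (mpA : PySem.Dict (List Char) (List Char))
    (b : StB) (pbA : List Nat)
    (hmp : b.mp = mpA)
    (hseg : RSeg pbA.reverse b.segs.reverse st1 (b.cur ++ b.pend))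
    (hch : List.IsChain (· > ·) pbA.reverse)
    (hhd : ∀ p ∈ pbA.reverse.head?, p < st1.length)
    (hk : 1 ≤ pbA.length) :
    CoupInv
      ⟨st1.take ((pbA.getLast?.getD 0) - 1) ++ ['#' :: PySem.Int.toChars (mpA.size : Int)],
        mpA.insert ('#' :: PySem.Int.toChars (mpA.size : Int))
          (List.foldl (· ++ ·) [] (st1.drop ((pbA.getLast?.getD 0) - 1)) ++ [')']),
        [')'], pbA.dropLast⟩
      ⟨b.segs.dropLast, (b.segs.getLast?).getD [],
        '#' :: PySem.Int.toChars (b.mp.size : Int), false,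
        b.mp.insert ('#' :: PySem.Int.toChars (b.mp.size : Int)) (b.cur ++ b.pend ++ [')'])⟩ := by
  subst hmp
  have hpbne : pbA ≠ [] := by intro h; rw [h] at hk; simp at hk
  obtain ⟨p, pbR', hrev⟩ : ∃ p pbR', pbA.reverse = p :: pbR' := by
    cases hpb : pbA.reverse with
    | nil => exact absurd (by simpa using congrArg List.reverse hpb) hpbne
    | cons p r => exact ⟨p, r, rfl⟩
  rw [hrev] at hseg hch hhd
  obtain ⟨sg, segsR', hsrev⟩ : ∃ sg segsR', b.segs.reverse = sg :: segsR' := by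
    cases hsg : b.segs.reverse with
    | nil => rw [hsg] at hseg; exact absurd hseg (by simp [RSeg])
    | cons s r => exact ⟨s, r, rfl⟩
  rw [hsrev] at hseg
  obtain ⟨h1, h2, h3, h4⟩ := hseg
  have hpb_eq : pbA = pbR'.reverse ++ [p] := by
    have := congrArg List.reverse hrev
    simpa using this
  have hsegs_eq : b.segs = segsR'.reverse ++ [sg] := by
    have := congrArg List.reverse hsrev
    simpa using this
  have hgl : (pbA.getLast?).getD 0 = p := by
    rw [← List.head?_reverse, hrev]; rfl
  have hcur : (b.segs.getLast?).getD [] = sg := by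
    rw [hsegs_eq, List.getLast?_concat]; rfl
  have hdl : pbA.dropLast = pbR'.reverse := by
    rw [hpb_eq, List.dropLast_concat]
  have hsdl : b.segs.dropLast = segsR'.reverse := by
    rw [hsegs_eq, List.dropLast_concat]
  have hval : List.foldl (· ++ ·) [] (st1.drop (p - 1)) ++ [')'] =
      b.cur ++ b.pend ++ [')'] := by
    rw [foldl_append_eq_flatten]
    simp only [List.nil_append]
    rw [h3]
  rw [hgl, hdl, hcur, hsdl]
  refine ⟨?_, ?_, ?_, ?_, ?_, by simp [pvIsIdent_hash_head]⟩
  · show b.mp.insert _ _ = b.mp.insert _ _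
    rw [hval]
  · show (if ([')'] : List Char) = [')'] then _ else _)
    rw [if_pos rfl]
    constructor
    · simp
    · exact ⟨_, rfl⟩
  · show RSeg pbR'.reverse.reverse segsR'.reverse.reverse
      (if ([')'] : List Char) = [')'] then _ else _) _
    rw [if_pos rfl, List.reverse_reverse, List.reverse_reverse]
    exact RSeg_append h4
  · show List.IsChain (· > ·) pbR'.reverse.reverse
    rw [List.reverse_reverse]
    exact (List.isChain_cons.mp hch).2
  · intro q hq
    rw [List.reverse_reverse] at hq
    have hqlt : p > q := (List.isChain_cons.mp hch).1 q hq
    show q < (if ([')'] : List Char) = [')']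
        then st1.take (p - 1) ++ ['#' :: PySem.Int.toChars (b.mp.size : Int)]
        else (st1.take (p - 1) ++ ['#' :: PySem.Int.toChars (b.mp.size : Int)]) ++ [[')']]).length
    rw [if_pos rfl]
    simp only [List.length_append, List.length_take, List.length_cons, List.length_nil]
    omega

-- the single-character simulation step
lemma step_main (c : Char) (a : StA) (b : StB) (hI : CoupInv a b)
    (hcl : c = ')' → 1 ≤ a.pb.length) :
    CoupInv (stepA a c) (stepB b c) ∧
      (stepA a c).pb.length =
        (if c = ')' then a.pb.length - 1
         else if c = '(' then a.pb.length + 1 else a.pb.length) := by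
  obtain ⟨hmp, hpend, hseg, hch, hhd, hwv⟩ := hI
  by_cases hpw : a.pw = [')']
  · -- A's pre_word is ")": B's pending is the matching '#k' placeholder
    rw [if_pos hpw] at hpend hseg hhd
    obtain ⟨hlast, t, hpt⟩ := hpend
    have hidB : ∀ d : Char, pvIsIdent (b.pend ++ [d]) = false := fun d => by
      rw [hpt]; exact pvIsIdent_hash
    by_cases hc1 : c = '('
    · -- open a new level; A does not flush (pre_word == ")")
      subst hc1
      rw [stepA_open_nf hpw, stepB_open (hidB '(') hwv]
      exact ⟨open_core a.st a.mp b a.pb hmp hlast hseg hch hhd, by simp⟩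
    · by_cases hc2 : c = ')'
      · -- close: the top segment becomes map value #k
        subst hc2
        rw [stepA_close_nf hpw, stepB_close (hidB ')') hwv]
        exact ⟨close_core a.st a.mp b a.pb hmp hseg hch hhd (hcl rfl), by simp⟩
      · by_cases hc3 : c = ' '
        · subst hc3
          rw [stepA_space pvIsIdent_space, stepB_space hwv]
          exact ⟨⟨hmp, by rw [if_pos hpw]; exact ⟨hlast, t, hpt⟩,
            by rw [if_pos hpw]; exact hseg, hch, by rw [if_pos hpw]; exact hhd, hwv⟩,
            by simp [hc2]⟩
        · -- symbol after ")": A does not flush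
          rw [stepA_sym_nf hpw hc1 hc2 hc3, stepB_sym (hidB c) hwv hc1 hc2 hc3]
          exact ⟨sym_core a.st a.mp b a.pb c hmp hseg hch hhd hc2, by simp [hc1, hc2]⟩
  · -- A's pre_word is an ordinary token: B's pending equals it
    rw [if_neg hpw] at hpend hseg hhd
    by_cases hid : pvIsIdent (a.pw ++ [c]) = true
    · -- identifier grows on both sides
      have hcno := pvIsIdent_last hid
      have hc1 : c ≠ '(' := by rintro rfl; revert hcno; decide
      have hc2 : c ≠ ')' := by rintro rfl; revert hcno; decide
      have hidp : pvIsIdent (b.pend ++ [c]) = true := by rw [hpend]; exact hid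
      rw [stepA_ident hid, stepB_ident hidp hwv]
      exact ⟨ident_core a.st a.mp b a.pb a.pw c hmp hpend hseg hch hhd
        (pvIsIdent_ne_rparen hid) hid (hwv.trans (pvIsIdent_prefix hidp)),
        by simp [hc1, hc2]⟩
    · have hid' : pvIsIdent (a.pw ++ [c]) = false := by simpa using hid
      have hidB : pvIsIdent (b.pend ++ [c]) = false := by rw [hpend]; exact hid'
      by_cases hc1 : c = '('
      · -- open: the flushed pre_word becomes the callee of the new level
        subst hc1
        rw [stepA_open_flush hid' hpw, stepB_open hidB hwv]
        have hcore := open_core (a.st ++ [a.pw]) a.mp b a.pb hmp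
          (by rw [hpend]; simp) hseg hch hhd
        rw [show (a.st ++ [a.pw]).length = a.st.length + 1 by simp] at hcore
        exact ⟨hcore, by simp⟩
      · by_cases hc2 : c = ')'
        · -- close, with the flushed pre_word as last token of the segment
          subst hc2
          rw [stepA_close_flush hid' hpw, stepB_close hidB hwv]
          exact ⟨close_core (a.st ++ [a.pw]) a.mp b a.pb hmp hseg hch hhd (hcl rfl),
            by simp⟩
        · by_cases hc3 : c = ' '
          · subst hc3
            rw [stepA_space pvIsIdent_space, stepB_space hwv]
            exact ⟨⟨hmp, by rw [if_neg hpw]; exact hpend,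
              by rw [if_neg hpw]; exact hseg, hch, by rw [if_neg hpw]; exact hhd, hwv⟩,
              by simp [hc2]⟩
          · -- ordinary symbol: flush pre_word, start token [c]
            rw [stepA_sym_flush hid' hpw hc1 hc2 hc3, stepB_sym hidB hwv hc1 hc2 hc3]
            exact ⟨sym_core (a.st ++ [a.pw]) a.mp b a.pb c hmp hseg hch hhd hc2,
              by simp [hc1, hc2]⟩

lemma sim : ∀ (cs : List Char) (a : StA) (b : StB),
    CoupInv a b → BalN cs a.pb.length →
    CoupInv (cs.foldl stepA a) (cs.foldl stepB b) := by
  intro cs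
  induction cs with
  | nil => intro a b h _; exact h
  | cons c cs ih =>
    intro a b hI hB
    simp only [List.foldl_cons]
    by_cases hc2 : c = ')'
    · rw [BalN, if_pos hc2] at hB
      obtain ⟨hk, hB'⟩ := hB
      obtain ⟨hI', hlen⟩ := step_main c a b hI (fun _ => hk)
      exact ih _ _ hI' (by rw [hlen, if_pos hc2]; exact hB')
    · obtain ⟨hI', hlen⟩ := step_main c a b hI (fun h => absurd h hc2)
      by_cases hc1 : c = '('
      · rw [BalN, if_neg hc2, if_pos hc1] at hB
        exact ih _ _ hI' (by rw [hlen, if_neg hc2, if_pos hc1]; exact hB)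
      · rw [BalN, if_neg hc2, if_neg hc1] at hB
        exact ih _ _ hI' (by rw [hlen, if_neg hc2, if_neg hc1]; exact hB)

lemma balOf : ∀ (cs : List Char) (k : Nat),
    (∀ i ≤ cs.length, (cs.take i).count ')' ≤ k + (cs.take i).count '(') →
    BalN cs k := by
  intro cs
  induction cs with
  | nil => intro k _; trivial
  | cons c cs ih =>
    intro k h
    have h1 := h 1 (by simp)
    have hs : ∀ i ≤ cs.length,
        (c :: cs.take i).count ')' ≤ k + (c :: cs.take i).count '(' := by
      intro i hi
      have := h (i + 1) (by simpa using Nat.succ_le_succ hi)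
      simpa using this
    rw [BalN]
    by_cases hc2 : c = ')'
    · subst hc2
      rw [if_pos rfl]
      have hk : 1 ≤ k := by simpa [List.count_cons] using h1
      refine ⟨hk, ih _ ?_⟩
      intro i hi
      have := hs i hi
      simp [List.count_cons] at this
      omega
    · rw [if_neg hc2]
      by_cases hc1 : c = '('
      · subst hc1
        rw [if_pos rfl]
        apply ih
        intro i hi
        have := hs i hi
        simp [List.count_cons] at this
        omega
      · rw [if_neg hc1]
        apply ih
        intro i hi
        have := hs i hi
        simp [List.count_cons, hc1, hc2] at this
        omega

-- reading the final answers off the invariant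
lemma fin_eq (a : StA) (b : StB) (h : CoupInv a b) :
    (if a.pw ≠ [')'] ∧ a.pw ≠ [';'] then a.st ++ [a.pw] else a.st).flatten =
      b.segs.flatten ++ (if b.pend ≠ [';'] then b.cur ++ b.pend else b.cur) ∧
    b.mp = a.mp := by
  obtain ⟨hmp, hpend, hseg, _, _, _⟩ := h
  refine ⟨?_, hmp⟩
  have hfl := RSeg_flatten hseg
  rw [List.reverse_reverse] at hfl
  by_cases hpw : a.pw = [')']
  · rw [if_pos hpw] at hpend
    rw [if_pos hpw] at hfl
    obtain ⟨_, t, hpt⟩ := hpend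
    have hps : b.pend ≠ [';'] := by rw [hpt]; simp
    rw [if_neg (by simp [hpw]), if_pos hps]
    simpa using hfl
  · rw [if_neg hpw] at hpend
    rw [if_neg hpw] at hfl
    by_cases hsc : a.pw = [';']
    · rw [if_neg (by simp [hsc]), if_neg (by rw [hpend]; simpa using hsc)]
      rw [List.flatten_append] at hfl
      simp only [List.flatten_cons, List.flatten_nil, List.append_nil] at hfl
      rw [hpend, hsc] at hfl
      rw [← List.append_assoc] at hfl
      exact List.append_cancel_right hfl
    · rw [if_pos ⟨hpw, hsc⟩, if_pos (by rw [hpend]; simpa using hsc)]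
      rw [hpend] at hfl ⊢
      simpa using hfl

-- ===== VERDICT (by name: the statement is the Claim_ definition above) =====
theorem decompose_nested_function_call_spec : Claim_equal_decompose_nested_function_call := by
  unfold Claim_equal_decompose_nested_function_call
  intro line _ hpre
  unfold Spec_decompose_nested_function_call
  have h0 : CoupInv ⟨[], PySem.Dict.empty, [], []⟩ ⟨[], [], [], true, PySem.Dict.empty⟩ := by
    refine ⟨rfl, by simp, ?_, by simp, by simp, by decide⟩
    show RSeg [] [] ([] ++ [[]]) ([] ++ [])
    simp [RSeg]
  have hb : BalN line.toList 0 := balOf _ _ (by simpa using hpre)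
  have hI := sim line.toList _ _ h0 hb
  obtain ⟨hflat, hmp⟩ := fin_eq _ _ hI
  unfold decompose_nested_function_call decompose_nested_function_call_alt
  simp only [hmp]
  refine Prod.ext rfl ?_
  show String.ofList _ = String.ofList _
  congr 1
  rw [foldl_append_eq_flatten, foldl_append_eq_flatten]
  simpa using hflat
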